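-- pv_equiv track=rewrite | github.com/charlie-gallagher/os-contiguous-malloc | memory_map_allocation.py | _get_best_slot
-- ===== SOURCE A (Python) =====
-- def _get_best_slot(available_slots):
--     """
--     Get best fit slot
--
--     Assumes ``available_slots`` only contains potential matches.
--     """
--     if len(available_slots) < 1:
--         return None
--
--     slot_sizes = list(set([x["slot_size"] for x in available_slots]))
--     best_slot_size = min(slot_sizes)
--     best_fit_slots = [
--         x for x in available_slots if x["slot_size"] == best_slot_size
--     ]
--     best_slot = best_fit_slots[0]
--     return best_slot
-- ===== SOURCE B (Python) =====
-- def _get_best_slot(available_slots):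
--     """Single pass keeping the running minimum (strict '<' keeps first of ties)."""
--     if len(available_slots) < 1:
--         return None
--     best = available_slots[0]
--     for x in available_slots[1:]:
--         if x["slot_size"] < best["slot_size"]:
--             best = x
--     return best
-- ===== Notes on version B (the rewrite author's own statement) =====
-- stated objective: simpler
-- what changed: Replaces A's three passes (set of sizes, min, filter then take [0]) by one accumulator scan that keeps the first slot with the smallest slot_size.
import Mathlib
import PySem

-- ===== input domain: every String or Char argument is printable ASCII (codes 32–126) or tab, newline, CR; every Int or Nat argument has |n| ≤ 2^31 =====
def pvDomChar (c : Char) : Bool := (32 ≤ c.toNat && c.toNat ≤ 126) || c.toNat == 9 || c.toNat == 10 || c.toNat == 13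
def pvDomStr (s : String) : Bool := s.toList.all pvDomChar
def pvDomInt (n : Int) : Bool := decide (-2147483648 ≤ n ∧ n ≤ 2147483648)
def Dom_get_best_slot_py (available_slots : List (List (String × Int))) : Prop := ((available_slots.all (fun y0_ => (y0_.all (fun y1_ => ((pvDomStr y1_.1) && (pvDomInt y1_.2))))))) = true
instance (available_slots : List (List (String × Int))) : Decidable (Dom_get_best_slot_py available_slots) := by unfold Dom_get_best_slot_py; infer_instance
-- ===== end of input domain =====

-- B replaces A's three passes (set of sizes, min, filter + [0]) by one running-minimum scan; same result.

-- shared primitive for  x["slot_size"]  (total via getD; Pre_ guarantees the key is present)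
def slotSize (x : List (String × Int)) : Int :=
  PySem.Dict.getD (PySem.Dict.ofList x) "slot_size" 0

-- ===== PORT A =====
def get_best_slot_py (available_slots : List (List (String × Int))) : Option (List (String × Int)) :=
  if PySem.List.len available_slots < 1 then none
  else
    let slot_sizes : List Int := PySem.Set.ofList (available_slots.map (fun x => slotSize x))
    match PySem.List.min? slot_sizes (fun v => v) with
    | none => none   -- unreachable: the guard makes slot_sizes nonempty (Python min would raise on [])
    | some best_slot_size =>
      let best_fit_slots := available_slots.filter (fun x => slotSize x == best_slot_size)
      PySem.List.pyGet? best_fit_slots 0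

-- ===== PORT B =====
def bStep (best x : List (String × Int)) : List (String × Int) :=
  if slotSize x < slotSize best then x else best

def get_best_slot_py_alt (available_slots : List (List (String × Int))) : Option (List (String × Int)) :=
  match available_slots with
  | [] => none
  | h :: t => some (t.foldl bStep h)

-- ===== PRECONDITION & SPEC =====
-- Pre_: every slot dict has the "slot_size" key (Python raises KeyError otherwise).
def Pre_get_best_slot_py (available_slots : List (List (String × Int))) : Prop :=
  ∀ x ∈ available_slots, (PySem.Dict.ofList x).contains "slot_size" = true
instance (available_slots : List (List (String × Int))) : Decidable (Pre_get_best_slot_py available_slots) := by unfold Pre_get_best_slot_py; infer_instance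

def pvWitness_get_best_slot_py : (List (List (String × Int))) :=
  [[("slot_size", 3)], [("slot_size", 2), ("base", 7)], [("slot_size", 2)]]

def Spec_get_best_slot_py (available_slots : List (List (String × Int))) (out : Option (List (String × Int))) : Prop := out = get_best_slot_py_alt available_slots
instance (available_slots : List (List (String × Int))) (out : Option (List (String × Int))) : Decidable (Spec_get_best_slot_py available_slots out) := by unfold Spec_get_best_slot_py; infer_instance

-- ===== CLAIM (what is proved, stated in full; the proofs are below) =====
def Claim_equal_get_best_slot_py : Prop := ∀ (available_slots : List (List (String × Int))), Dom_get_best_slot_py available_slots → Pre_get_best_slot_py available_slots → Spec_get_best_slot_py available_slots (get_best_slot_py available_slots)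

-- ===== LEMMAS AND PROOFS =====

-- B's fold returns the FIRST slot of minimal size: everything before it is strictly larger,
-- everything after it is no smaller.
lemma foldl_bStep_decomp (t : List (List (String × Int))) :
    ∀ h, ∃ pre post,
      h :: t = pre ++ (t.foldl bStep h) :: post ∧
      (∀ y ∈ pre, slotSize (t.foldl bStep h) < slotSize y) ∧
      (∀ y ∈ post, slotSize (t.foldl bStep h) ≤ slotSize y) := by
  induction t with
  | nil => intro h; exact ⟨[], [], rfl, by simp, by simp⟩
  | cons x t ih =>
    intro h
    simp only [List.foldl_cons]
    by_cases hx : slotSize x < slotSize h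
    · rw [show bStep h x = x from if_pos hx]
      obtain ⟨pre, post, hdec, hpre, hpost⟩ := ih x
      refine ⟨h :: pre, post, ?_, ?_, hpost⟩
      · simpa using congrArg (h :: ·) hdec
      · intro y hy
        rcases List.mem_cons.mp hy with rfl | hy
        · -- y = h : the fold result is ≤ slotSize x < slotSize h
          have hmem : ∀ z ∈ x :: t, slotSize (t.foldl bStep x) ≤ slotSize z := by
            intro z hz
            rw [hdec] at hz
            rcases List.mem_append.mp hz with h1 | h2
            · exact le_of_lt (hpre z h1)
            · rcases List.mem_cons.mp h2 with rfl | h2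
              · exact le_refl _
              · exact hpost z h2
          exact lt_of_le_of_lt (hmem x List.mem_cons_self) hx
        · exact hpre y hy
    · rw [show bStep h x = h from if_neg hx]
      obtain ⟨pre, post, hdec, hpre, hpost⟩ := ih h
      cases pre with
      | nil =>
        -- fold result is h itself
        have hb : t.foldl bStep h = h := by
          have := hdec; simp at this; exact this.1.symm
        have hpost' : post = t := by
          have := hdec; simp at this; exact this.2.symm
        refine ⟨[], x :: t, by simp [hb], by simp, ?_⟩
        intro y hy
        rcases List.mem_cons.mp hy with rfl | hy
        · rw [hb]; omega
        · rw [hpost'] at hpost; exact hpost y hy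
      | cons p pre₂ =>
        have hph : p = h ∧ t = pre₂ ++ (t.foldl bStep h) :: post := by
          have := hdec; simp at this; exact ⟨this.1.symm, this.2⟩
        refine ⟨h :: x :: pre₂, post, ?_, ?_, hpost⟩
        · simpa using congrArg (fun l => h :: x :: l) hph.2
        · intro y hy
          have hbh : slotSize (t.foldl bStep h) < slotSize h := by
            have := hpre p (by simp); rw [hph.1] at this; exact this
          rcases List.mem_cons.mp hy with rfl | hy
          · exact hbh
          · rcases List.mem_cons.mp hy with rfl | hy
            · omega
            · exact hpre y (by simp [hy])

-- the fold result is a global minimizer of h :: t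
lemma foldl_bStep_isMin (t : List (List (String × Int))) (h : List (String × Int)) :
    ∀ y ∈ h :: t, slotSize (t.foldl bStep h) ≤ slotSize y := by
  obtain ⟨pre, post, hdec, hpre, hpost⟩ := foldl_bStep_decomp t h
  intro y hy
  rw [hdec] at hy
  rcases List.mem_append.mp hy with h1 | h2
  · exact le_of_lt (hpre y h1)
  · rcases List.mem_cons.mp h2 with rfl | h2
    · exact le_refl _
    · exact hpost y h2

lemma foldl_bStep_mem (t : List (List (String × Int))) (h : List (String × Int)) :
    t.foldl bStep h ∈ h :: t := by
  obtain ⟨pre, post, hdec, -, -⟩ := foldl_bStep_decomp t h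
  rw [hdec]; exact List.mem_append.mpr (Or.inr (List.mem_cons_self))

-- ===== VERDICT (by name: the statement is the Claim_ definition above) =====
theorem get_best_slot_py_spec : Claim_equal_get_best_slot_py := by
  intro xs _hdom _hpre
  unfold Spec_get_best_slot_py
  cases xs with
  | nil => rfl
  | cons h t =>
    set b := t.foldl bStep h with hb
    have hguard : ¬ PySem.List.len (h :: t) < 1 := by
      simp [PySem.List.len_eq]
    -- the min over the size set is slotSize b
    have hmin : PySem.List.min? (PySem.Set.ofList ((h :: t).map (fun x => slotSize x))) (fun v => v)
        = some (slotSize b) := by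
      cases hm : PySem.List.min? (PySem.Set.ofList ((h :: t).map (fun x => slotSize x))) (fun v => v) with
      | none =>
        have hnil := (PySem.List.min?_eq_none_iff _ _).mp hm
        have : slotSize h ∈ PySem.Set.ofList ((h :: t).map (fun x => slotSize x)) := by
          rw [PySem.Set.mem_ofList]; exact List.mem_map.mpr ⟨h, List.mem_cons_self, rfl⟩
        simp_all
      | some m =>
        have hmem : m ∈ PySem.Set.ofList ((h :: t).map (fun x => slotSize x)) :=
          PySem.List.min?_mem hm
        rw [PySem.Set.mem_ofList] at hmem
        obtain ⟨y, hy, hym⟩ := List.mem_map.mp hmem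
        have h1 : slotSize b ≤ m := hym ▸ foldl_bStep_isMin t h y hy
        have h2 : m ≤ slotSize b := by
          have hbmem : slotSize b ∈ PySem.Set.ofList ((h :: t).map (fun x => slotSize x)) := by
            rw [PySem.Set.mem_ofList]
            exact List.mem_map.mpr ⟨b, foldl_bStep_mem t h, rfl⟩
          exact PySem.List.min?_isMin hm _ hbmem
        congr 1; omega
    -- first element of the filter is b
    obtain ⟨pre, post, hdec, hpre, -⟩ := foldl_bStep_decomp t h
    rw [← hb] at hdec hpre
    have hfilter : (h :: t).filter (fun x => slotSize x == slotSize b)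
        = b :: post.filter (fun x => slotSize x == slotSize b) := by
      rw [hdec, List.filter_append]
      have hnil : pre.filter (fun x => slotSize x == slotSize b) = [] := by
        rw [List.filter_eq_nil_iff]
        intro y hy
        have := hpre y hy
        simp only [beq_iff_eq]; omega
      rw [hnil, List.nil_append, List.filter_cons, if_pos (by simp)]
    rw [get_best_slot_py, if_neg hguard]
    simp only [hmin, hfilter, get_best_slot_py_alt, PySem.List.pyGet?_zero_cons]
    exact congrArg some hb
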